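-- pv_equiv track=rewrite | github.com/AleksandarLilic/ama-riscv-sim | script/tda.py | classify_and_sort_counters
-- ===== SOURCE A (Python) =====
-- CLASS_ORDER = [
--     "cycles", "ret", "stall", "bad_spec", "ret_*", "stall_*", "l1i_*", "l1d_*"]
--
-- DROP_KEYS = {"cpi", "ipc"}
--
-- EXACT_CLASS = {
--     "cycles": "cycles", "ret": "ret", "stalls": "stall", "bad_spec": "bad_spec"}
--
-- PREFIX_CLASS = [
--     ("ret_", "ret_*"), ("stall_", "stall_*"),
--     ("l1i_", "l1i_*"), ("l1d_", "l1d_*")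
-- ]
--
-- def classify_and_sort_counters(core: dict) -> list[tuple[str, int, str]]:
--     """Classify core counters into groups and sort by class order then name."""
--     class_rank = {c: i for i, c in enumerate(CLASS_ORDER)}
--     entries = []
--     for key, val in core.items():
--         if key in DROP_KEYS:
--             continue
--         cls = EXACT_CLASS.get(key)
--         if cls is None:
--             for prefix, prefix_cls in PREFIX_CLASS:
--                 if key.startswith(prefix):
--                     cls = prefix_cls
--                     break
--         if cls is None:
--             continue
--         entries.append((key, val, cls))
--     SORT_FIRST = {"ret_int"} # special case to override the default sorting
--     entries.sort(
--         key=lambda e: (class_rank[e[2]], 0 if e[0] in SORT_FIRST else 1, e[0]))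
--     return entries
-- ===== SOURCE B (Python) =====
-- CLASS_ORDER = [
--     "cycles", "ret", "stall", "bad_spec", "ret_*", "stall_*", "l1i_*", "l1d_*"]
--
-- DROP_KEYS = {"cpi", "ipc"}
--
-- EXACT_CLASS = {
--     "cycles": "cycles", "ret": "ret", "stalls": "stall", "bad_spec": "bad_spec"}
--
-- PREFIX_CLASS = [
--     ("ret_", "ret_*"), ("stall_", "stall_*"),
--     ("l1i_", "l1i_*"), ("l1d_", "l1d_*")
-- ]
--
-- def _classify(key):
--     """Class of a counter key, or None if dropped/unclassified."""
--     if key in DROP_KEYS: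
--         return None
--     if key in EXACT_CLASS:
--         return EXACT_CLASS[key]
--     for prefix, prefix_cls in PREFIX_CLASS:
--         if key.startswith(prefix):
--             return prefix_cls
--     return None
--
-- def classify_and_sort_counters(core: dict) -> list[tuple[str, int, str]]:
--     """Group-by-class, sort each group, concatenate groups in class order."""
--     labeled = [(key, val, _classify(key)) for key, val in core.items()]
--     out = []
--     for cls in CLASS_ORDER:
--         group = [(key, val) for key, val, c in labeled if c == cls]
--         group.sort(key=lambda kv: (0 if kv[0] == "ret_int" else 1, kv[0]))
--         out.extend((key, val, cls) for key, val in group)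
--     return out
-- ===== Notes on version B (the rewrite author's own statement) =====
-- stated objective: alternative
-- what changed: A builds one entry list and does a single global stable sort on a composite (class-rank, ret_int-flag, name) key; B groups entries per class, sorts each class bucket by (flag, name) only, and concatenates the buckets in CLASS_ORDER.
import Mathlib
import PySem

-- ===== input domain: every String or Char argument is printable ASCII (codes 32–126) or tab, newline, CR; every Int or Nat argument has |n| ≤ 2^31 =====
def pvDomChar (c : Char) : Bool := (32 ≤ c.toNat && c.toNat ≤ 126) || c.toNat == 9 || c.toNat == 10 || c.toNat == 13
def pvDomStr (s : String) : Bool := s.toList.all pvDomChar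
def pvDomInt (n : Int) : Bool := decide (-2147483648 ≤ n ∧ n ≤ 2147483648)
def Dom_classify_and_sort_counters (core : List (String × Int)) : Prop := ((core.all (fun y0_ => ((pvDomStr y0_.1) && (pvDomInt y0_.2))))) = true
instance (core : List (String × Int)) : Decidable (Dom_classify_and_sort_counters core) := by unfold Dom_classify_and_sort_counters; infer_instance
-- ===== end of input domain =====

-- B replaces A's single global sort on a composite (class-rank, ret_int-flag, name) key by
-- per-class buckets sorted individually and concatenated in CLASS_ORDER (objective: alternative
-- decomposition, same result).

-- ===== PORT A =====
-- module-level constants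
def pvClassOrder : List String :=
  ["cycles", "ret", "stall", "bad_spec", "ret_*", "stall_*", "l1i_*", "l1d_*"]
def pvDropKeys : PySem.Set String := PySem.Set.ofList ["cpi", "ipc"]
def pvExactClass : PySem.Dict String String :=
  PySem.Dict.ofList [("cycles", "cycles"), ("ret", "ret"), ("stalls", "stall"), ("bad_spec", "bad_spec")]
def pvPrefixClass : List (String × String) :=
  [("ret_", "ret_*"), ("stall_", "stall_*"), ("l1i_", "l1i_*"), ("l1d_", "l1d_*")]

-- A: class_rank = {c: i for i, c in enumerate(CLASS_ORDER)}
def pvClassRank : PySem.Dict String Int :=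
  (PySem.List.enumerate pvClassOrder).foldl (fun d ic => d.insert ic.2 ic.1) PySem.Dict.empty

-- A: the inner 'for prefix, prefix_cls in PREFIX_CLASS: … break' loop
def pvPrefixLoopA : String → List (String × String) → Option String
  | _, [] => none
  | key, pc :: rest =>
      if PySem.Str.startswith key pc.1 then some pc.2 else pvPrefixLoopA key rest

-- A's sort-key lambda as a strict 'less than' on entries: the 3-tuple comparison
-- (class_rank[e[2]], 0 if e[0] in SORT_FIRST else 1, e[0]) is written out lexicographically
-- (Lean's Prod '<' is pointwise, Python's is lexicographic — exact here). class_rank[e[2]] is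
-- ported as getD _ 0: exact because every produced class is a key of class_rank (no KeyError).
def pvBeforeA (e1 e2 : String × Int × String) : Bool :=
  let r1 : Int := pvClassRank.getD e1.2.2 0
  let r2 : Int := pvClassRank.getD e2.2.2 0
  let f1 : Int := if (PySem.Set.ofList ["ret_int"]).contains e1.1 then 0 else 1
  let f2 : Int := if (PySem.Set.ofList ["ret_int"]).contains e2.1 then 0 else 1
  decide (r1 < r2) || (r1 == r2 && (decide (f1 < f2) || (f1 == f2 && decide (e1.1 < e2.1))))

def classify_and_sort_counters (core : List (String × Int)) : List (String × Int × String) :=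
  let entries := core.foldl (fun entries kv =>
    if pvDropKeys.contains kv.1 then entries
    else
      let cls := pvExactClass.get? kv.1
      let cls := match cls with
        | some c => some c
        | none => pvPrefixLoopA kv.1 pvPrefixClass
      match cls with
      | none => entries
      | some c => entries ++ [(kv.1, kv.2, c)]) []
  -- entries.sort(key=…): Python's stable sort, in the shape of PySem.List.sorted
  -- (left fold of ordered insertion with the strict 'before' comparator)
  entries.foldl (fun acc e => PySem.List.insertBy pvBeforeA e acc) []

-- ===== PORT B =====
-- B: the inner prefix loop of _classify
def pvFindPrefix : String → List (String × String) → Option String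
  | _, [] => none
  | key, pc :: rest =>
      if PySem.Str.startswith key pc.1 then some pc.2 else pvFindPrefix key rest

-- B: _classify(key)
def pvClassify (key : String) : Option String :=
  if pvDropKeys.contains key then none
  else match pvExactClass.get? key with
    | some c => some c
    | none => pvFindPrefix key pvPrefixClass

def classify_and_sort_counters_alt (core : List (String × Int)) : List (String × Int × String) :=
  let labeled := core.map (fun kv => (kv.1, kv.2, pvClassify kv.1))
  pvClassOrder.foldl (fun out cls =>
    let group := (labeled.filter (fun e => e.2.2 == some cls)).map (fun e => (e.1, e.2.1))
    let sortedGroup := PySem.List.sorted2 group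
      (fun kv => if kv.1 == "ret_int" then (0 : Int) else 1) (fun kv => kv.1)
    out ++ sortedGroup.map (fun kv => (kv.1, kv.2, cls))) []

-- ===== PRECONDITION & SPEC =====
def Spec_classify_and_sort_counters (core : List (String × Int)) (out : List (String × Int × String)) : Prop := out = classify_and_sort_counters_alt core
instance (core : List (String × Int)) (out : List (String × Int × String)) : Decidable (Spec_classify_and_sort_counters core out) := by unfold Spec_classify_and_sort_counters; infer_instance

-- ===== CLAIM (what is proved, stated in full; the proofs are below) =====
def Claim_equal_classify_and_sort_counters : Prop := ∀ (core : List (String × Int)), Dom_classify_and_sort_counters core → Spec_classify_and_sort_counters core (classify_and_sort_counters core)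

-- ===== LEMMAS AND PROOFS =====

-- the classified entries, per key
def pvEntsOf (core : List (String × Int)) : List (String × Int × String) :=
  core.filterMap (fun kv => (pvClassify kv.1).map (fun c => (kv.1, kv.2, c)))

-- the comparator PySem.List.sorted2 uses on B's (key, val) pairs
def pvPairLt (p q : String × Int) : Bool :=
  decide ((if p.1 == "ret_int" then (0 : Int) else 1) < (if q.1 == "ret_int" then (0 : Int) else 1)) ||
  (!decide ((if q.1 == "ret_int" then (0 : Int) else 1) < (if p.1 == "ret_int" then (0 : Int) else 1)) &&
    decide (p.1 < q.1))

-- one sorted class bucket, as triples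
def pvSeg (c : String) (es : List (String × Int × String)) : List (String × Int × String) :=
  (PySem.List.sorted2 ((es.filter (fun e => e.2.2 == c)).map (fun e => (e.1, e.2.1)))
    (fun kv => if kv.1 == "ret_int" then (0 : Int) else 1) (fun kv => kv.1)).map
    (fun kv => (kv.1, kv.2, c))

def pvSegsOf : List String → List (String × Int × String) → List (String × Int × String)
  | [], _ => []
  | c :: cs, es => pvSeg c es ++ pvSegsOf cs es

def pvRk (c : String) : Int := pvClassRank.getD c 0

theorem pvPrefixLoopA_eq (key : String) (l : List (String × String)) :
    pvPrefixLoopA key l = pvFindPrefix key l := by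
  induction l with
  | nil => rfl
  | cons pc rest ih => simp [pvPrefixLoopA, pvFindPrefix, ih]

theorem pvFoldA (core : List (String × Int)) (init : List (String × Int × String)) :
    core.foldl (fun entries kv =>
      if pvDropKeys.contains kv.1 then entries
      else
        let cls := pvExactClass.get? kv.1
        let cls := match cls with
          | some c => some c
          | none => pvPrefixLoopA kv.1 pvPrefixClass
        match cls with
        | none => entries
        | some c => entries ++ [(kv.1, kv.2, c)]) init = init ++ pvEntsOf core := by
  induction core generalizing init with
  | nil => simp [pvEntsOf]
  | cons kv rest ih =>
      rw [List.foldl_cons, ih]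
      by_cases hd : pvDropKeys.contains kv.1
      · have hcl : pvClassify kv.1 = none := by
          simp only [pvClassify, hd, if_true]
        have hd2 : kv.1 ∈ pvDropKeys := by simpa using hd
        simp [hd2, hcl, pvEntsOf]
      · have hd' : kv.1 ∉ pvDropKeys := by simpa using hd
        cases hg : pvExactClass.get? kv.1 with
        | some c =>
            have hcl : pvClassify kv.1 = some c := by simp [pvClassify, hd', hg]
            simp [hd', hcl, pvEntsOf]
        | none =>
            cases hp : pvFindPrefix kv.1 pvPrefixClass with
            | none =>
                have hcl : pvClassify kv.1 = none := by simp [pvClassify, hd', hg, hp]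
                simp [hd', pvPrefixLoopA_eq, hp, hcl, pvEntsOf]
            | some c =>
                have hcl : pvClassify kv.1 = some c := by simp [pvClassify, hd', hg, hp]
                simp [hd', pvPrefixLoopA_eq, hp, hcl, pvEntsOf]

theorem pvInsertBy_skip {α : Type} (f : α → α → Bool) (x : α) (l1 l2 : List α)
    (h : ∀ y ∈ l1, f x y = false) :
    PySem.List.insertBy f x (l1 ++ l2) = l1 ++ PySem.List.insertBy f x l2 := by
  induction l1 with
  | nil => rfl
  | cons a l ih =>
      have ha : f x a = false := h a (by simp)
      simp [PySem.List.insertBy, ha]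
      exact ih (fun y hy => h y (by simp [hy]))


theorem pvInsertBy_stop {α : Type} (f : α → α → Bool) (x : α) (l1 l2 : List α)
    (h : ∀ y ∈ l2, f x y = true) :
    PySem.List.insertBy f x (l1 ++ l2) = PySem.List.insertBy f x l1 ++ l2 := by
  induction l1 with
  | nil =>
      cases l2 with
      | nil => rfl
      | cons b l => simp [PySem.List.insertBy, h b (by simp)]
  | cons a l ih =>
      by_cases ha : f x a = true
      · simp [PySem.List.insertBy, ha]
      · simp only [List.cons_append, PySem.List.insertBy]
        rw [if_neg ha, if_neg ha, ih]
        simp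


theorem pvInsertBy_map {α β : Type} (g : β → β → Bool) (f' : α → α → Bool) (h : α → β)
    (p : α) (l : List α) (hc : ∀ q ∈ l, g (h p) (h q) = f' p q) :
    PySem.List.insertBy g (h p) (l.map h) = (PySem.List.insertBy f' p l).map h := by
  induction l with
  | nil => rfl
  | cons a l ih =>
      have ha := hc a (by simp)
      by_cases hb : f' p a = true
      · simp [PySem.List.insertBy, ha, hb]
      · simp only [List.map_cons, PySem.List.insertBy, ha]
        rw [if_neg hb, if_neg hb, ih (fun q hq => hc q (by simp [hq]))]
        simp


theorem pvMem_seg {y : String × Int × String} {c : String} {es : List (String × Int × String)}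
    (h : y ∈ pvSeg c es) : y.2.2 = c := by
  simp only [pvSeg, List.mem_map] at h
  obtain ⟨kv, _, hk⟩ := h
  rw [← hk]


theorem pvMem_segsOf {y : String × Int × String} {cs : List String}
    {es : List (String × Int × String)} (h : y ∈ pvSegsOf cs es) : y.2.2 ∈ cs := by
  induction cs with
  | nil => simp [pvSegsOf] at h
  | cons c cs ih =>
      simp only [pvSegsOf, List.mem_append] at h
      rcases h with h | h
      · simp [pvMem_seg h]
      · simp [ih h]


theorem pvBeforeA_same (e1 e2 : String × Int × String) (h : e1.2.2 = e2.2.2) :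
    pvBeforeA e1 e2 = pvPairLt (e1.1, e1.2.1) (e2.1, e2.2.1) := by
  simp only [pvBeforeA, pvPairLt, h]
  by_cases h1 : e1.1 = "ret_int" <;> by_cases h2 : e2.1 = "ret_int" <;>
    simp [h1, h2, PySem.Set.contains, PySem.Set.ofList]


theorem pvBeforeA_lt (e1 e2 : String × Int × String) (h : pvRk e1.2.2 < pvRk e2.2.2) :
    pvBeforeA e1 e2 = true := by
  simp only [pvRk] at h
  simp [pvBeforeA, h]


theorem pvBeforeA_gt (e1 e2 : String × Int × String) (h : pvRk e2.2.2 < pvRk e1.2.2) :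
    pvBeforeA e1 e2 = false := by
  simp only [pvRk] at h
  have h1 : ¬ (pvClassRank.getD e1.2.2 0 < pvClassRank.getD e2.2.2 0) := by omega
  have h2 : pvClassRank.getD e1.2.2 0 ≠ pvClassRank.getD e2.2.2 0 := by omega
  simp [pvBeforeA, h1, h2]


theorem pvSeg_skip (c : String) (es : List (String × Int × String))
    (e : String × Int × String) (h : e.2.2 ≠ c) : pvSeg c (es ++ [e]) = pvSeg c es := by
  simp [pvSeg, List.filter_append, beq_iff_eq, h]


theorem pvSegsOf_skip (cs : List String) (es : List (String × Int × String))
    (e : String × Int × String) (h : e.2.2 ∉ cs) : pvSegsOf cs (es ++ [e]) = pvSegsOf cs es := by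
  induction cs with
  | nil => rfl
  | cons c cs ih =>
      simp only [List.mem_cons, not_or] at h
      simp only [pvSegsOf, pvSeg_skip c es e h.1, ih h.2]


theorem pvSorted2_append_single {α κ₁ κ₂ : Type} [LT κ₁] [DecidableLT κ₁] [LT κ₂]
    [DecidableLT κ₂] (xs : List α) (x : α) (k1 : α → κ₁) (k2 : α → κ₂) :
    PySem.List.sorted2 (xs ++ [x]) k1 k2 =
      PySem.List.insertBy
        (fun a b => decide (k1 a < k1 b) || (!decide (k1 b < k1 a) && decide (k2 a < k2 b)))
        x (PySem.List.sorted2 xs k1 k2) := by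
  simp [PySem.List.sorted2, List.foldl_append]

theorem pvSeg_ins (c : String) (es : List (String × Int × String))
    (e : String × Int × String) (h : e.2.2 = c) :
    pvSeg c (es ++ [e]) = PySem.List.insertBy pvBeforeA e (pvSeg c es) := by
  obtain ⟨k, v, c'⟩ := e
  simp only at h
  subst h
  simp only [pvSeg, List.filter_append, List.map_append]
  rw [show List.filter (fun e => e.2.2 == c') [(k, v, c')] = [(k, v, c')] by simp]
  simp only [List.map_cons, List.map_nil]
  rw [pvSorted2_append_single]
  refine (pvInsertBy_map pvBeforeA _ (fun kv => (kv.1, kv.2, c')) (k, v) _ ?_).symm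
  intro q _
  exact pvBeforeA_same (k, v, c') (q.1, q.2, c') rfl

theorem pvIns (cs : List String) (e : String × Int × String) (es : List (String × Int × String))
    (hin : e.2.2 ∈ cs) (hp : cs.Pairwise (fun a b => pvRk a < pvRk b)) :
    PySem.List.insertBy pvBeforeA e (pvSegsOf cs es) = pvSegsOf cs (es ++ [e]) := by
  induction cs with
  | nil => simp at hin
  | cons c cs ih =>
      have hcr : ∀ b ∈ cs, pvRk c < pvRk b := fun b hb => (List.pairwise_cons.1 hp).1 b hb
      have hp' := (List.pairwise_cons.1 hp).2
      simp only [pvSegsOf]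
      rcases List.mem_cons.1 hin with hec | hec
      · have hrest : pvSegsOf cs (es ++ [e]) = pvSegsOf cs es := by
          refine pvSegsOf_skip cs es e (fun hmem => ?_)
          have := hcr _ hmem
          rw [hec] at this
          omega
        rw [hrest, pvInsertBy_stop pvBeforeA e _ _ ?stop, pvSeg_ins c es e hec]
        case stop =>
          intro y hy
          refine pvBeforeA_lt e y ?_
          rw [hec]
          exact hcr _ (pvMem_segsOf hy)
      · have hne : e.2.2 ≠ c := by
          intro hc
          have := hcr _ hec
          rw [hc] at this
          omega
        rw [pvInsertBy_skip pvBeforeA e _ _ ?skip, ih hec hp', pvSeg_skip c es e hne]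
        case skip =>
          intro y hy
          refine pvBeforeA_gt e y ?_
          rw [pvMem_seg hy]
          exact hcr _ hec

theorem pvMain (es : List (String × Int × String)) (h : ∀ e ∈ es, e.2.2 ∈ pvClassOrder) :
    es.foldl (fun acc e => PySem.List.insertBy pvBeforeA e acc) [] = pvSegsOf pvClassOrder es := by
  induction es using List.reverseRecOn with
  | nil => decide
  | append_singleton es e ih =>
      rw [List.foldl_append, List.foldl_cons, List.foldl_nil,
        ih (fun x hx => h x (by simp [hx]))]
      exact pvIns pvClassOrder e es (h e (by simp)) (by decide)

theorem pvCls_mem (k : String) (c : String) (h : pvClassify k = some c) : c ∈ pvClassOrder := by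
  simp only [pvClassify] at h
  split at h
  · exact absurd h (by simp)
  · cases hg : pvExactClass.get? k with
    | some c' =>
        rw [hg] at h
        obtain ⟨pr, hfind, h2⟩ : ∃ pr, pvExactClass.items.find? (fun p => p.1 == k) = some pr ∧ pr.2 = c' := by
          simpa [PySem.Dict.get?, Option.map_eq_some_iff] using hg
        have hpr : pr ∈ pvExactClass.items := List.mem_of_find?_eq_some hfind
        have hcc : c' = c := by simpa using h
        subst hcc
        rw [← h2]
        have hpr2 : pr ∈ [("cycles","cycles"), ("ret","ret"), ("stalls","stall"), ("bad_spec","bad_spec")] := by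
          have hit : pvExactClass.items =
              [("cycles","cycles"), ("ret","ret"), ("stalls","stall"), ("bad_spec","bad_spec")] := by decide
          rwa [hit] at hpr
        rcases List.mem_cons.1 hpr2 with h | hpr2 <;>
          [skip; rcases List.mem_cons.1 hpr2 with h | hpr2] <;>
          [skip; skip; rcases List.mem_cons.1 hpr2 with h | hpr2] <;>
          [skip; skip; skip; rcases List.mem_cons.1 hpr2 with h | hpr2] <;>
          first
            | (subst h; decide)
            | simp at hpr2
    | none =>
        rw [hg] at h
        simp only [pvFindPrefix, pvPrefixClass] at h
        split_ifs at h
        · injection h with h; subst h; decide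
        · injection h with h; subst h; decide
        · injection h with h; subst h; decide
        · injection h with h; subst h; decide

theorem pvGroupB (core : List (String × Int)) (c : String) :
    ((core.map (fun kv => (kv.1, kv.2, pvClassify kv.1))).filter
        (fun e => e.2.2 == some c)).map (fun e => (e.1, e.2.1)) =
      ((pvEntsOf core).filter (fun e => e.2.2 == c)).map (fun e => (e.1, e.2.1)) := by
  induction core with
  | nil => rfl
  | cons kv rest ih =>
      simp only [List.map_cons, pvEntsOf, List.filterMap_cons]
      cases hc : pvClassify kv.1 with
      | none => simpa [hc, pvEntsOf] using ih
      | some c' =>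
          by_cases he : c' = c
          · subst he
            simp only [Option.map_some, List.filter_cons]
            simpa [pvEntsOf] using ih
          · simpa [hc, pvEntsOf, he, List.filter_cons] using ih

theorem pvAlt_eq (core : List (String × Int)) :
    classify_and_sort_counters_alt core = pvSegsOf pvClassOrder (pvEntsOf core) := by
  unfold classify_and_sort_counters_alt
  simp only [pvClassOrder, List.foldl_cons, List.foldl_nil, pvGroupB]
  simp only [pvSegsOf, pvSeg, List.append_assoc, List.nil_append, List.append_nil]

-- ===== VERDICT (by name: the statement is the Claim_ definition above) =====
theorem classify_and_sort_counters_spec : Claim_equal_classify_and_sort_counters := by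
  intro core _
  unfold Spec_classify_and_sort_counters
  show classify_and_sort_counters core = _
  unfold classify_and_sort_counters
  rw [pvFoldA core [], List.nil_append, pvAlt_eq]
  refine pvMain _ ?_
  intro e he
  simp only [pvEntsOf, List.mem_filterMap] at he
  obtain ⟨kv, _, hk⟩ := he
  cases hc : pvClassify kv.1 with
  | none => simp [hc] at hk
  | some c => simp [hc] at hk; rw [← hk]; exact pvCls_mem _ _ hc
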